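-- pv_equiv track=rewrite | github.com/llewpriimak/class_work | CS313E/Homework Assignments/Cipher.py | d_string_table
-- ===== SOURCE A (Python) =====
-- def d_string_table(complete_message, size):
--     table = [[None] * size for i in range(size)]
--     k = 0
--     for i in range(-1, -(size + 1), -1):
--         for j in range(size):
--             if k < len(complete_message):
--                 table[j][i] = complete_message[k]
--                 k += 1
--             else:
--                 break
--     k = 0
--     for i in range(size):
--         for j in range(size):
--             if k < len(complete_message):
--                 if table[i][j] != None:
--                     table[i][j] = complete_message[k]
--                     k += 1
--                 else:
--                     table[i][j] = '*'
--     return table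
-- ===== SOURCE B (Python) =====
-- def d_string_table(complete_message, size):
--     # Closed-form single row-major pass: each row is '*'-padding followed by its
--     # slice of the message (columns are filled from the right in A).
--     if size <= 0:
--         return []
--     n = len(complete_message)
--     m = min(n, size * size)
--     full, rem = divmod(m, size)
--     table = []
--     for i in range(size):
--         cnt = full + (1 if i < rem else 0)
--         off = i * full + min(i, rem)
--         table.append(['*'] * (size - cnt) + list(complete_message[off:off + cnt]))
--     return table
-- ===== Notes on version B (the rewrite author's own statement) =====
-- stated objective: simpler
-- what changed: A fills the table column-major right-to-left and then overwrites it in a second nested row-major pass; B computes per row the number of message cells (divmod of min(len,size^2) by size) and builds each row directly as '*'-padding followed by a slice of the message, in one pass with no mutation. Pre_ excludes size > len(complete_message), where A's returned table still contains None cells (not strings of the declared type).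
-- outside the precondition, e.g. on d_string_table('', 1): A returns [[None]], B returns [['*']]
import Mathlib
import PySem

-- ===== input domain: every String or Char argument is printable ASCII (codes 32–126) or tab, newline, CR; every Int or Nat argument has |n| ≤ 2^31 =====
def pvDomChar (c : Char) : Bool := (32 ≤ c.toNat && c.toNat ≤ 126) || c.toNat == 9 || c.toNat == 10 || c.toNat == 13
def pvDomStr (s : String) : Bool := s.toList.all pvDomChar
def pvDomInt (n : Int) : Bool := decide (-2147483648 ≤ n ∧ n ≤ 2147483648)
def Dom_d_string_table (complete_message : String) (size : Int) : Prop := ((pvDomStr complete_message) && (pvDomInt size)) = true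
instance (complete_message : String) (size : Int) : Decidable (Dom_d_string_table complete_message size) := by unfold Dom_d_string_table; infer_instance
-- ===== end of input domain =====

-- B builds each row directly ('*'-padding ++ a slice of the message) from divmod arithmetic,
-- replacing A's column-major fill plus row-major overwrite; same asymptotic cost, simpler.

-- ===== PORT A =====
-- A-side helpers: the table is a List of rows of Option String (a cell is None or a 1-char string).
def pvSing (c : Char) : String := String.ofList [c]

-- table[r][c] = v  (Python indexing; exact for in-range indices, the only ones A uses)
def pvSet2 (t : List (List (Option String))) (r c : Int) (v : Option String) :
    List (List (Option String)) :=
  PySem.List.pySetD t r (PySem.List.pySetD (PySem.List.pyGetD t r []) c v)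

-- table[r][c]
def pvGet2 (t : List (List (Option String))) (r c : Int) : Option String :=
  PySem.List.pyGetD (PySem.List.pyGetD t r []) c none

-- inner loop of A's first pass (has a 'break', hence structural recursion over the j-range)
def pvA_inner1 (cs : List Char) (i : Int) :
    List Int → List (List (Option String)) × Int → List (List (Option String)) × Int
  | [], st => st
  | j :: js, st =>
      if st.2 < (cs.length : Int) then
        pvA_inner1 cs i js
          (pvSet2 st.1 j i (some (pvSing (PySem.List.pyGetD cs st.2 ' '))), st.2 + 1)
      else st  -- break

-- body of A's second (row-major) pass
def pvA_body2 (cs : List Char) (i j : Int)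
    (st : List (List (Option String)) × Int) : List (List (Option String)) × Int :=
  if st.2 < (cs.length : Int) then
    if pvGet2 st.1 i j ≠ none then
      (pvSet2 st.1 i j (some (pvSing (PySem.List.pyGetD cs st.2 ' '))), st.2 + 1)
    else (pvSet2 st.1 i j (some "*"), st.2)
  else st

def d_string_table (complete_message : String) (size : Int) : List (List String) :=
  let cs := complete_message.toList
  -- table = [[None] * size for i in range(size)]
  let table0 : List (List (Option String)) :=
    (PySem.List.pyRange 0 size 1).map (fun _ => PySem.List.pyRepeat [(none : Option String)] size)
  let st1 := (PySem.List.pyRange (-1) (-(size + 1)) (-1)).foldl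
      (fun st i => pvA_inner1 cs i (PySem.List.pyRange 0 size 1) st) (table0, (0 : Int))
  let st2 := (PySem.List.pyRange 0 size 1).foldl
      (fun st i => (PySem.List.pyRange 0 size 1).foldl (fun st' j => pvA_body2 cs i j st') st)
      (st1.1, (0 : Int))
  -- Python returns the table; under Pre_ every cell is a 1-char string or '*' (the getD default is unreachable)
  st2.1.map (fun row => row.map (fun o => o.getD ""))

-- ===== PORT B =====
-- B-side helper: a 1-char string
def pvSingB (c : Char) : String := String.ofList [c]

def d_string_table_alt (complete_message : String) (size : Int) : List (List String) :=
  if size ≤ 0 then []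
  else
    let cs := complete_message.toList
    let n : Int := (cs.length : Int)
    let m := min n (size * size)
    let full := PySem.Int.floordiv m size
    let rem := PySem.Int.mod m size
    (PySem.List.pyRange 0 size 1).foldl
      (fun table i =>
        let cnt := full + (if i < rem then 1 else 0)
        let off := i * full + min i rem
        table ++ [PySem.List.pyRepeat ["*"] (size - cnt) ++
          (PySem.List.slice cs (some off) (some (off + cnt))).map (fun c => pvSingB c)]) []

-- ===== PRECONDITION & SPEC =====
-- Pre_ excludes size > len(complete_message): there A's returned table still contains None
-- cells, which are not values of the declared String cell type.
def Pre_d_string_table (complete_message : String) (size : Int) : Prop :=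
  size ≤ (complete_message.toList.length : Int)

instance (complete_message : String) (size : Int) :
    Decidable (Pre_d_string_table complete_message size) := by
  unfold Pre_d_string_table; infer_instance

def pvWitness_d_string_table : String × Int := ("abcde", 2)

def Spec_d_string_table (complete_message : String) (size : Int) (out : List (List String)) : Prop := out = d_string_table_alt complete_message size
instance (complete_message : String) (size : Int) (out : List (List String)) : Decidable (Spec_d_string_table complete_message size out) := by unfold Spec_d_string_table; infer_instance

-- ===== CLAIM (what is proved, stated in full; the proofs are below) =====
def Claim_equal_d_string_table : Prop := ∀ (complete_message : String) (size : Int), Dom_d_string_table complete_message size → Pre_d_string_table complete_message size → Spec_d_string_table complete_message size (d_string_table complete_message size)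

-- ===== LEMMAS AND PROOFS =====

-- the table as a function of (row, col) on List.range s
def pvMapT (s : Nat) (f : Nat → Nat → Option String) : List (List (Option String)) :=
  (List.range s).map (fun a => (List.range s).map (f a))

-- per-row arithmetic (full/rem = divmod of min n (s*s) by s): cells, offset, running index
def pvCnt (full rem i : Nat) : Nat := full + (if i < rem then 1 else 0)
def pvOff (full rem i : Nat) : Nat := i * full + min i rem
def pvK (full rem s i j : Nat) : Nat := pvOff full rem i + (j - min j (s - pvCnt full rem i))

-- table contents after A's first pass (c columns from the right done, j0 cells of column c)
def pvF1 (cs : List Char) (s c j0 : Nat) : Nat → Nat → Option String :=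
  fun a b =>
    if (s - 1 - b < c ∨ (s - 1 - b = c ∧ a < j0)) ∧ (s - 1 - b) * s + a < cs.length then
      some (pvSing (cs.getD ((s - 1 - b) * s + a) ' '))
    else none

-- final cell contents, and progress of A's second pass (rows < i done, j0 cells of row i)
def pvFin (cs : List Char) (s full rem : Nat) : Nat → Nat → Option String :=
  fun a b => if s - pvCnt full rem a ≤ b then some (pvSing (cs.getD (pvK full rem s a b) ' ')) else some "*"

def pvG (init fin : Nat → Nat → Option String) (i j0 : Nat) : Nat → Nat → Option String :=
  fun a b => if a < i ∨ (a = i ∧ b < j0) then fin a b else init a b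

-- the common closed-form result both ports are reduced to
def pvSpecF (cs : List Char) (s full rem : Nat) : List (List String) :=
  (List.range s).map (fun a => (List.range s).map (fun b =>
    if s - pvCnt full rem a ≤ b then pvSing (cs.getD (pvK full rem s a b) ' ') else "*"))

-- ── PySem cast bridges ──
theorem pv_fdiv_natCast (a b : Nat) :
    PySem.Int.floordiv (a:Int) (b:Int) = ((a/b : Nat) : Int) := by
  unfold PySem.Int.floordiv
  rw [Int.fdiv_eq_ediv]
  rw [if_pos (Or.inl (by positivity))]
  rw [Int.sub_zero]
  norm_cast

theorem pv_fmod_natCast (a b : Nat) :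
    PySem.Int.mod (a:Int) (b:Int) = ((a%b : Nat) : Int) := by
  unfold PySem.Int.mod
  rw [Int.fmod_eq_emod]
  rw [if_pos (Or.inl (by positivity))]
  rw [Int.add_zero]
  norm_cast

theorem pv_pySetD_neg {α : Type} (xs : List α) (k : Nat) (v : α)
    (h1 : 0 < k) (h2 : k ≤ xs.length) :
    PySem.List.pySetD xs (-(k:Int)) v = xs.set (xs.length - k) v := by
  simp only [PySem.List.pySetD, PySem.List.pySet?, PySem.List.pyIdx?]
  rw [if_neg (by omega), if_pos (by omega)]
  simp

theorem pv_toNat_sub (a b : Nat) : ((a:Int) - (b:Int)).toNat = a - b := by omega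

-- ── pvMapT access/update lemmas ──
theorem pvMapT_congr {s : Nat} {f g : Nat → Nat → Option String}
    (h : ∀ a b, a < s → b < s → f a b = g a b) : pvMapT s f = pvMapT s g := by
  unfold pvMapT
  refine List.map_congr_left ?_
  intro a ha
  refine List.map_congr_left ?_
  intro b hb
  exact h a b (List.mem_range.mp ha) (List.mem_range.mp hb)

theorem pv_row_mapT {s a : Nat} (f : Nat → Nat → Option String) (ha : a < s) :
    PySem.List.pyGetD (pvMapT s f) ((a:Nat):Int) [] = (List.range s).map (f a) := by
  rw [PySem.List.pyGetD_natCast]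
  simp [pvMapT, List.getD_eq_getElem?_getD, ha]

theorem pv_mapT_set {s a c : Nat} (f : Nat → Nat → Option String) (v : Option String)
    (ha : a < s) (hc : c < s) :
    (pvMapT s f).set a (((List.range s).map (f a)).set c v)
      = pvMapT s (fun x y => if x = a ∧ y = c then v else f x y) := by
  apply List.ext_getElem
  · simp [pvMapT]
  · intro x hx1 hx2
    simp only [pvMapT, List.length_map, List.length_range] at hx1 hx2
    simp only [pvMapT, List.getElem_map, List.getElem_range, List.getElem_set]
    split_ifs with hax
    · subst hax
      apply List.ext_getElem
      · simp
      · intro y hy1 hy2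
        simp only [List.length_map, List.length_range] at hy1 hy2
        simp only [List.getElem_map, List.getElem_range, List.getElem_set]
        by_cases hcy : c = y
        · subst hcy
          simp
        · rw [if_neg hcy, if_neg (fun h => hcy h.2.symm)]
    · apply List.map_congr_left
      intro y hy
      rw [if_neg (fun h => hax h.1.symm)]

theorem pv_set2_mapT_nat {s a b : Nat} (f : Nat → Nat → Option String) (v : Option String)
    (ha : a < s) (hb : b < s) :
    pvSet2 (pvMapT s f) ((a:Nat):Int) ((b:Nat):Int) v
      = pvMapT s (fun x y => if x = a ∧ y = b then v else f x y) := by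
  unfold pvSet2
  rw [pv_row_mapT f ha, PySem.List.pySetD_natCast, PySem.List.pySetD_natCast]
  exact pv_mapT_set f v ha hb

theorem pv_set2_mapT_neg {s a k : Nat} (f : Nat → Nat → Option String) (v : Option String)
    (ha : a < s) (hk0 : 0 < k) (hks : k ≤ s) :
    pvSet2 (pvMapT s f) ((a:Nat):Int) (-(k:Int)) v
      = pvMapT s (fun x y => if x = a ∧ y = s - k then v else f x y) := by
  unfold pvSet2
  rw [pv_row_mapT f ha, PySem.List.pySetD_natCast,
      pv_pySetD_neg _ _ _ hk0 (by simpa using hks)]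
  have hlen : ((List.range s).map (f a)).length - k = s - k := by simp
  rw [hlen]
  exact pv_mapT_set f v ha (by omega)

theorem pv_get2_mapT {s a b : Nat} (f : Nat → Nat → Option String)
    (ha : a < s) (hb : b < s) :
    pvGet2 (pvMapT s f) ((a:Nat):Int) ((b:Nat):Int) = f a b := by
  unfold pvGet2
  rw [pv_row_mapT f ha, PySem.List.pyGetD_natCast]
  simp [List.getD_eq_getElem?_getD, hb]

-- ── arithmetic facts (context: full*s + rem = min n (s*s), rem < s) ──
theorem pv_full_pos {s n full rem : Nat} (hs0 : 0 < s) (hsn : s ≤ n)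
    (hm : full * s + rem = min n (s*s)) (hrem : rem < s) : 1 ≤ full := by
  have hss : s ≤ s * s := Nat.le_mul_of_pos_left s hs0
  rcases Nat.eq_zero_or_pos full with h | h
  · rw [h, Nat.zero_mul] at hm; omega
  · exact h

theorem pv_full_le {s n full rem : Nat} (hs0 : 0 < s)
    (hm : full * s + rem = min n (s*s)) (hrem : rem < s) : full ≤ s := by
  by_contra h
  have h2 : (s+1) * s ≤ full * s := Nat.mul_le_mul_right s (by omega)
  rw [Nat.succ_mul] at h2
  have h3 : min n (s*s) ≤ s*s := Nat.min_le_right _ _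
  generalize full * s = A at h2 hm
  generalize s * s = B at h2 hm h3
  omega

theorem pv_cnt_le {s n full rem : Nat} (hs0 : 0 < s)
    (hm : full * s + rem = min n (s*s)) (hrem : rem < s) (i : Nat) :
    pvCnt full rem i ≤ s := by
  have h1 : full ≤ s := pv_full_le hs0 hm hrem
  unfold pvCnt
  split_ifs with hi
  · rcases Nat.lt_or_ge full s with h | h
    · omega
    · have hfs : full = s := by omega
      subst hfs
      have h3 : min n (full*full) ≤ full*full := Nat.min_le_right _ _
      generalize full * full = B at hm h3
      omega
  · omega

theorem pv_off_succ (full rem i : Nat) :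
    pvOff full rem (i+1) = pvOff full rem i + pvCnt full rem i := by
  unfold pvOff pvCnt
  have h : (i+1) * full = i * full + full := Nat.succ_mul i full
  split_ifs with hi <;>
    (generalize i * full = A at h ⊢
     generalize (i+1) * full = B at h ⊢
     omega)

theorem pv_off_le {s n full rem : Nat} (hm : full * s + rem = min n (s*s))
    (i : Nat) (hi : i ≤ s) :
    pvOff full rem i ≤ min n (s*s) := by
  unfold pvOff
  have h2 : i * full ≤ s * full := Nat.mul_le_mul_right full hi
  have h3 : s * full = full * s := Nat.mul_comm s full
  have h4 : min i rem ≤ rem := Nat.min_le_right _ _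
  generalize i * full = A at h2 ⊢
  generalize s * full = B at h2 h3
  generalize full * s = C at h3 hm
  omega

theorem pv_K_succ (full rem s i j : Nat) (hj : j < s) :
    pvK full rem s i (j+1)
      = pvK full rem s i j + (if s - pvCnt full rem i ≤ j then 1 else 0) := by
  unfold pvK
  split_ifs with h <;> omega

theorem pv_K_lt {s n full rem : Nat} (hs0 : 0 < s) (hsn : s ≤ n)
    (hm : full * s + rem = min n (s*s)) (hrem : rem < s)
    (i j : Nat) (hi : i < s) (hj : j < s) :
    pvK full rem s i j < min n (s*s) := by
  have hc1 : 1 ≤ pvCnt full rem i := by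
    have := pv_full_pos hs0 hsn hm hrem; unfold pvCnt; split_ifs <;> omega
  have hc2 : pvCnt full rem i ≤ s := pv_cnt_le hs0 hm hrem i
  have h1 : pvK full rem s i j + 1 ≤ pvOff full rem i + pvCnt full rem i := by
    unfold pvK; omega
  rw [← pv_off_succ] at h1
  have h2 := pv_off_le hm (i+1) (by omega)
  omega

theorem pv_K_zero (full rem s i : Nat) : pvK full rem s i 0 = pvOff full rem i := by
  simp [pvK]

theorem pv_K_row {s n full rem : Nat} (hs0 : 0 < s)
    (hm : full * s + rem = min n (s*s)) (hrem : rem < s) (i : Nat) :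
    pvK full rem s i s = pvK full rem s (i+1) 0 := by
  have hc2 : pvCnt full rem i ≤ s := pv_cnt_le hs0 hm hrem i
  rw [pv_K_zero, pv_off_succ]
  unfold pvK
  omega

theorem pv_mask_iff {s n full rem : Nat} (hs0 : 0 < s) (hsn : s ≤ n)
    (hm : full * s + rem = min n (s*s)) (hrem : rem < s)
    (i j : Nat) (hi : i < s) (hj : j < s) :
    ((s-1-j) * s + i < n ↔ s - pvCnt full rem i ≤ j) := by
  have hss : s ≤ s * s := Nat.le_mul_of_pos_left s hs0
  have hq1 : (s-1-j) * s ≤ (s-1) * s := Nat.mul_le_mul_right s (by omega)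
  have hq2 : (s-1) * s + s = s * s := by
    rw [Nat.sub_one_mul]; omega
  have hfle : full ≤ s := pv_full_le hs0 hm hrem
  rcases Nat.lt_trichotomy (s-1-j) full with h | h | h
  · have h2 : (s-1-j) * s + s ≤ full * s := by
      have := Nat.mul_le_mul_right s (Nat.succ_le_of_lt h)
      rwa [Nat.succ_mul] at this
    unfold pvCnt
    split_ifs with hir <;>
      (generalize hA : (s-1-j) * s = A at h2 ⊢
       generalize hB : full * s = B at h2 hm
       generalize hC : (s-1) * s = C at hq1 hq2
       omega)
  · have h2 : (s-1-j) * s = full * s := by rw [h]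
    unfold pvCnt
    split_ifs with hir <;>
      (generalize hA : (s-1-j) * s = A at h2 hq1 ⊢
       generalize hB : full * s = B at h2 hm
       generalize hC : (s-1) * s = C at hq1 hq2
       omega)
  · have h2 : full * s + s ≤ (s-1-j) * s := by
      have := Nat.mul_le_mul_right s (Nat.succ_le_of_lt h)
      rwa [Nat.succ_mul] at this
    unfold pvCnt
    split_ifs with hir <;>
      (generalize hA : (s-1-j) * s = A at h2 hq1 ⊢
       generalize hB : full * s = B at h2 hm
       generalize hC : (s-1) * s = C at hq1 hq2
       omega)

-- ── A's first pass ──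
theorem pv_inner1 (cs : List Char) (s c : Nat) (hc : c < s) :
    ∀ d j0, j0 + d = s →
    pvA_inner1 cs (-(c:Int) - 1) (PySem.List.pyRange (j0:Int) (s:Int) 1)
      (pvMapT s (pvF1 cs s c j0), ((min cs.length (c*s + j0) : Nat) : Int))
    = (pvMapT s (pvF1 cs s c s), ((min cs.length (c*s + s) : Nat) : Int)) := by
  intro d
  induction d with
  | zero =>
    intro j0 h0
    have hj : j0 = s := by omega
    subst hj
    rw [PySem.List.pyRange_one_eq_nil (le_refl _)]
    rfl
  | succ d ih =>
    intro j0 h0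
    have hj0 : j0 < s := by omega
    rw [PySem.List.pyRange_one_cons (by exact_mod_cast hj0)]
    by_cases hkn : c*s + j0 < cs.length
    · have hmin : min cs.length (c*s + j0) = c*s + j0 := Nat.min_eq_right (Nat.le_of_lt hkn)
      rw [hmin]
      simp only [pvA_inner1]
      rw [if_pos (by exact_mod_cast hkn)]
      have hcol : pvSet2 (pvMapT s (pvF1 cs s c j0)) ((j0:Nat):Int) (-(c:Int) - 1)
          (some (pvSing (PySem.List.pyGetD cs ((c*s + j0 : Nat):Int) ' ')))
          = pvMapT s (pvF1 cs s c (j0+1)) := by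
        rw [PySem.List.pyGetD_natCast]
        have hneg : (-(c:Int) - 1) = -(((c+1 : Nat)):Int) := by push_cast; ring
        rw [hneg, pv_set2_mapT_neg _ _ hj0 (by omega) (by omega)]
        apply pvMapT_congr
        intro a b ha hb
        by_cases hab : a = j0 ∧ b = s - (c+1)
        · obtain ⟨h1, h2⟩ := hab
          subst h1; subst h2
          rw [if_pos ⟨rfl, rfl⟩]
          unfold pvF1
          rw [show s - 1 - (s - (c+1)) = c from by omega]
          rw [if_pos ⟨Or.inr ⟨rfl, Nat.lt_succ_self _⟩, hkn⟩]
        · rw [if_neg hab]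
          unfold pvF1
          refine if_congr (and_congr_left' ?_) rfl rfl
          omega
      rw [hcol]
      have hk1 : ((c*s + j0 : Nat) : Int) + 1 = ((min cs.length (c*s + (j0+1)) : Nat) : Int) := by
        have hmin2 : min cs.length (c*s + (j0+1)) = c*s + (j0+1) := by
          apply Nat.min_eq_right
          generalize c * s = q at hkn ⊢
          omega
        rw [hmin2]
        push_cast
        ring
      rw [hk1, show ((j0:Int) + 1) = (((j0+1 : Nat)):Int) from by push_cast; ring]
      exact ih (j0+1) (by omega)
    · have hmin : min cs.length (c*s + j0) = cs.length := by
        apply Nat.min_eq_left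
        generalize c * s = q at hkn ⊢
        omega
      rw [hmin]
      simp only [pvA_inner1]
      rw [if_neg (by omega)]
      have htbl : pvMapT s (pvF1 cs s c j0) = pvMapT s (pvF1 cs s c s) := by
        apply pvMapT_congr
        intro a b ha hb
        unfold pvF1
        by_cases hbc : s - 1 - b = c
        · have hprod : (s - 1 - b) * s = c * s := by rw [hbc]
          refine if_congr ?_ rfl rfl
          rw [hprod, hbc]
          generalize c * s = q at hkn ⊢
          omega
        · refine if_congr (and_congr_left' ?_) rfl rfl
          omega
      have hk : (cs.length : Int) = ((min cs.length (c*s + s) : Nat) : Int) := by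
        have hmin2 : min cs.length (c*s + s) = cs.length := by
          apply Nat.min_eq_left
          generalize c * s = q at hkn ⊢
          omega
        rw [hmin2]
      rw [htbl, hk]

theorem pv_outer1 (cs : List Char) (s : Nat) (hs0 : 0 < s) :
    ∀ d c, c + d = s →
    List.foldl (fun st i => pvA_inner1 cs i (PySem.List.pyRange 0 (s:Int) 1) st)
      (pvMapT s (pvF1 cs s c 0), ((min cs.length (c*s) : Nat):Int))
      (PySem.List.pyRange (-(c:Int) - 1) (-(s:Int) - 1) (-1))
    = (pvMapT s (pvF1 cs s s 0), ((min cs.length (s*s) : Nat):Int)) := by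
  intro d
  induction d with
  | zero =>
    intro c h0
    have hc : c = s := by omega
    subst hc
    rw [PySem.List.pyRange_neg_one_eq_nil (le_refl _)]
    rfl
  | succ d ih =>
    intro c h0
    have hc : c < s := by omega
    rw [PySem.List.pyRange_neg_one_cons (by push_cast; omega)]
    rw [List.foldl_cons]
    have hstep := pv_inner1 cs s c hc s 0 (by omega)
    simp only [Nat.cast_zero, Nat.add_zero] at hstep
    rw [hstep]
    have htbl : pvMapT s (pvF1 cs s c s) = pvMapT s (pvF1 cs s (c+1) 0) := by
      apply pvMapT_congr
      intro a b ha hb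
      unfold pvF1
      refine if_congr (and_congr_left' ?_) rfl rfl
      omega
    have hk : ((min cs.length (c*s + s) : Nat):Int) = ((min cs.length ((c+1)*s) : Nat):Int) := by
      rw [Nat.succ_mul]
    rw [htbl, hk]
    have hrange : (-(c:Int) - 1 - 1) = (-((c+1 : Nat):Int) - 1) := by push_cast; ring
    rw [hrange]
    exact ih (c+1) (by omega)

-- ── A's second pass ──
theorem pv_inner2 (cs : List Char) (s full rem : Nat) (hs0 : 0 < s) (hsn : s ≤ cs.length)
    (hm : full * s + rem = min cs.length (s*s)) (hrem : rem < s)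
    (i : Nat) (hi : i < s) :
    ∀ d j0, j0 + d = s →
    List.foldl (fun st' j => pvA_body2 cs ((i:Nat):Int) j st')
      (pvMapT s (pvG (pvF1 cs s s 0) (pvFin cs s full rem) i j0), ((pvK full rem s i j0 : Nat):Int))
      (PySem.List.pyRange (j0:Int) (s:Int) 1)
    = (pvMapT s (pvG (pvF1 cs s s 0) (pvFin cs s full rem) i s), ((pvK full rem s i s : Nat):Int)) := by
  intro d
  induction d with
  | zero =>
    intro j0 h0
    have hj : j0 = s := by omega
    subst hj
    rw [PySem.List.pyRange_one_eq_nil (le_refl _)]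
    rfl
  | succ d ih =>
    intro j0 h0
    have hj0 : j0 < s := by omega
    rw [PySem.List.pyRange_one_cons (by exact_mod_cast hj0), List.foldl_cons]
    have hKlt : pvK full rem s i j0 < cs.length := by
      have h1 := pv_K_lt hs0 hsn hm hrem i j0 hi hj0
      have h2 : min cs.length (s*s) ≤ cs.length := Nat.min_le_left _ _
      omega
    have hget : pvGet2 (pvMapT s (pvG (pvF1 cs s s 0) (pvFin cs s full rem) i j0))
        ((i:Nat):Int) ((j0:Nat):Int) = pvF1 cs s s 0 i j0 := by
      rw [pv_get2_mapT _ hi hj0]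
      unfold pvG
      rw [if_neg (by omega)]
    by_cases hmask : s - pvCnt full rem i ≤ j0
    · have hinit : pvF1 cs s s 0 i j0
          = some (pvSing (cs.getD ((s-1-j0) * s + i) ' ')) := by
        unfold pvF1
        rw [if_pos ⟨Or.inl (by omega), (pv_mask_iff hs0 hsn hm hrem i j0 hi hj0).mpr hmask⟩]
      unfold pvA_body2
      rw [if_pos (by simpa using hKlt)]
      rw [hget, hinit]
      rw [if_pos (by simp)]
      have hwrite : pvSet2 (pvMapT s (pvG (pvF1 cs s s 0) (pvFin cs s full rem) i j0))
          ((i:Nat):Int) ((j0:Nat):Int)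
          (some (pvSing (PySem.List.pyGetD cs ((pvK full rem s i j0 : Nat):Int) ' ')))
          = pvMapT s (pvG (pvF1 cs s s 0) (pvFin cs s full rem) i (j0+1)) := by
        rw [PySem.List.pyGetD_natCast, pv_set2_mapT_nat _ _ hi hj0]
        apply pvMapT_congr
        intro a b ha hb
        by_cases hab : a = i ∧ b = j0
        · obtain ⟨h1, h2⟩ := hab
          subst h1; subst h2
          rw [if_pos ⟨rfl, rfl⟩]
          unfold pvG
          rw [if_pos (Or.inr ⟨rfl, Nat.lt_succ_self _⟩)]
          unfold pvFin
          rw [if_pos hmask]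
        · rw [if_neg hab]
          unfold pvG
          refine if_congr ?_ rfl rfl
          omega
      rw [hwrite]
      have hk1 : ((pvK full rem s i j0 : Nat):Int) + 1 = ((pvK full rem s i (j0+1) : Nat):Int) := by
        rw [pv_K_succ full rem s i j0 hj0, if_pos hmask]
        push_cast; ring
      rw [hk1, show ((j0:Int) + 1) = (((j0+1 : Nat)):Int) from by push_cast; ring]
      exact ih (j0+1) (by omega)
    · have hinit : pvF1 cs s s 0 i j0 = none := by
        unfold pvF1
        rw [if_neg (fun hcon => hmask ((pv_mask_iff hs0 hsn hm hrem i j0 hi hj0).mp hcon.2))]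
      unfold pvA_body2
      rw [if_pos (by simpa using hKlt)]
      rw [hget, hinit]
      rw [if_neg (by simp)]
      have hwrite : pvSet2 (pvMapT s (pvG (pvF1 cs s s 0) (pvFin cs s full rem) i j0))
          ((i:Nat):Int) ((j0:Nat):Int) (some "*")
          = pvMapT s (pvG (pvF1 cs s s 0) (pvFin cs s full rem) i (j0+1)) := by
        rw [pv_set2_mapT_nat _ _ hi hj0]
        apply pvMapT_congr
        intro a b ha hb
        by_cases hab : a = i ∧ b = j0
        · obtain ⟨h1, h2⟩ := hab
          subst h1; subst h2
          rw [if_pos ⟨rfl, rfl⟩]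
          unfold pvG
          rw [if_pos (Or.inr ⟨rfl, Nat.lt_succ_self _⟩)]
          unfold pvFin
          rw [if_neg hmask]
        · rw [if_neg hab]
          unfold pvG
          refine if_congr ?_ rfl rfl
          omega
      rw [hwrite]
      have hk1 : ((pvK full rem s i j0 : Nat):Int) = ((pvK full rem s i (j0+1) : Nat):Int) := by
        rw [pv_K_succ full rem s i j0 hj0, if_neg hmask]
        norm_num
      rw [hk1, show ((j0:Int) + 1) = (((j0+1 : Nat)):Int) from by push_cast; ring]
      exact ih (j0+1) (by omega)

theorem pv_outer2 (cs : List Char) (s full rem : Nat) (hs0 : 0 < s) (hsn : s ≤ cs.length)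
    (hm : full * s + rem = min cs.length (s*s)) (hrem : rem < s) :
    ∀ d i, i + d = s →
    List.foldl (fun st i => List.foldl (fun st' j => pvA_body2 cs i j st') st
        (PySem.List.pyRange 0 (s:Int) 1))
      (pvMapT s (pvG (pvF1 cs s s 0) (pvFin cs s full rem) i 0), ((pvK full rem s i 0 : Nat):Int))
      (PySem.List.pyRange (i:Int) (s:Int) 1)
    = (pvMapT s (pvG (pvF1 cs s s 0) (pvFin cs s full rem) s 0), ((pvK full rem s s 0 : Nat):Int)) := by
  intro d
  induction d with
  | zero =>
    intro i h0
    have hi : i = s := by omega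
    subst hi
    rw [PySem.List.pyRange_one_eq_nil (le_refl _)]
    rfl
  | succ d ih =>
    intro i h0
    have hi : i < s := by omega
    rw [PySem.List.pyRange_one_cons (a := (i:Int)) (b := (s:Int)) (by exact_mod_cast hi),
        List.foldl_cons]
    have hstep := pv_inner2 cs s full rem hs0 hsn hm hrem i hi s 0 (by omega)
    simp only [Nat.cast_zero] at hstep
    rw [hstep]
    have htbl : pvMapT s (pvG (pvF1 cs s s 0) (pvFin cs s full rem) i s)
        = pvMapT s (pvG (pvF1 cs s s 0) (pvFin cs s full rem) (i+1) 0) := by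
      apply pvMapT_congr
      intro a b ha hb
      unfold pvG
      refine if_congr ?_ rfl rfl
      omega
    rw [htbl, pv_K_row hs0 hm hrem i]
    rw [show ((i:Int) + 1) = (((i+1 : Nat)):Int) from by push_cast; ring]
    exact ih (i+1) (by omega)

-- ── port A equals the closed form ──
theorem pv_portA (msg : String) (s full rem : Nat) (hs0 : 0 < s)
    (hsn : s ≤ msg.toList.length)
    (hm : full * s + rem = min msg.toList.length (s*s)) (hrem : rem < s) :
    d_string_table msg (s:Int) = pvSpecF msg.toList s full rem := by
  unfold d_string_table
  dsimp only
  have htab0 : (PySem.List.pyRange 0 (s:Int) 1).map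
      (fun _ => PySem.List.pyRepeat [(none : Option String)] (s:Int))
      = pvMapT s (pvF1 msg.toList s 0 0) := by
    rw [PySem.List.pyRange_zero_natCast, List.map_map, PySem.List.pyRepeat_singleton]
    unfold pvMapT pvF1
    apply List.map_congr_left
    intro a ha
    simp [List.eq_replicate_iff]
  rw [show (-((s:Int) + 1)) = (-(s:Int) - 1) from by ring, htab0]
  have h1 := pv_outer1 msg.toList s hs0 s 0 (by omega)
  simp only [Nat.cast_zero, Nat.zero_mul, Nat.min_zero, neg_zero, zero_sub] at h1
  rw [h1]
  dsimp only
  have h2 := pv_outer2 msg.toList s full rem hs0 hsn hm hrem s 0 (by omega)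
  simp only [Nat.cast_zero] at h2
  rw [show pvMapT s (pvG (pvF1 msg.toList s s 0) (pvFin msg.toList s full rem) 0 0)
        = pvMapT s (pvF1 msg.toList s s 0) from
      pvMapT_congr (fun a b ha hb => by unfold pvG; rw [if_neg (by omega)])] at h2
  rw [show ((pvK full rem s 0 0 : Nat):Int) = (0:Int) from by simp [pvK, pvOff]] at h2
  rw [h2]
  dsimp only
  unfold pvSpecF pvMapT
  simp only [List.map_map]
  apply List.map_congr_left
  intro a ha
  simp only [Function.comp]
  rw [List.map_map]
  apply List.map_congr_left
  intro b hb
  simp only [Function.comp]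
  unfold pvG pvFin
  rw [if_pos (Or.inl (List.mem_range.mp ha))]
  split_ifs <;> rfl

-- ── port B: one row equals the closed-form row ──
theorem pv_rowB (cs : List Char) (s full rem : Nat) (hs0 : 0 < s) (hsn : s ≤ cs.length)
    (hm : full * s + rem = min cs.length (s*s)) (hrem : rem < s)
    (i : Nat) (hi : i < s) :
    List.replicate (s - pvCnt full rem i) "*"
      ++ ((cs.drop (pvOff full rem i)).take (pvCnt full rem i)).map pvSing
    = (List.range s).map (fun b =>
        if s - pvCnt full rem i ≤ b then pvSing (cs.getD (pvK full rem s i b) ' ') else "*") := by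
  have hcle : pvCnt full rem i ≤ s := pv_cnt_le hs0 hm hrem i
  have hoc : pvOff full rem i + pvCnt full rem i ≤ cs.length := by
    rw [← pv_off_succ]
    have h1 := pv_off_le hm (i+1) (by omega)
    have h2 : min cs.length (s*s) ≤ cs.length := Nat.min_le_left _ _
    omega
  have hlen_take : ((cs.drop (pvOff full rem i)).take (pvCnt full rem i)).length
      = pvCnt full rem i := by
    simp [List.length_take, List.length_drop]
    omega
  apply List.ext_getElem
  · simp only [List.length_append, List.length_replicate, List.length_map, List.length_range,
      hlen_take]
    omega
  · intro b hb1 hb2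
    simp only [List.length_append, List.length_replicate, hlen_take] at hb1
    simp only [List.length_map, List.length_range] at hb2
    simp only [List.getElem_map, List.getElem_range]
    rcases Nat.lt_or_ge b (s - pvCnt full rem i) with h | h
    · rw [List.getElem_append_left (by simpa using h)]
      rw [List.getElem_replicate]
      rw [if_neg (by omega)]
    · rw [List.getElem_append_right (by simpa using h)]
      simp only [List.length_replicate, List.getElem_map]
      have hidx : b - (s - pvCnt full rem i) < pvCnt full rem i := by omega
      rw [if_pos h]
      have hKeq : pvK full rem s i b = pvOff full rem i + (b - (s - pvCnt full rem i)) := by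
        unfold pvK
        omega
      rw [List.getElem_take, List.getElem_drop]
      rw [List.getD_eq_getElem cs ' ' (by rw [hKeq]; omega)]
      simp only [hKeq]

-- ── port B equals the closed form ──
theorem pv_portB (msg : String) (s full rem : Nat) (hs0 : 0 < s)
    (hsn : s ≤ msg.toList.length)
    (hm : full * s + rem = min msg.toList.length (s*s)) (hrem : rem < s) :
    d_string_table_alt msg (s:Int) = pvSpecF msg.toList s full rem := by
  unfold d_string_table_alt
  rw [if_neg (by omega)]
  dsimp only
  rw [show ((s:Int) * (s:Int)) = ((s*s : Nat):Int) from by push_cast; ring]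
  rw [← Nat.cast_min]
  rw [pv_fdiv_natCast, pv_fmod_natCast]
  have hfull : (min msg.toList.length (s*s)) / s = full := by
    have := Nat.div_add_mod (min msg.toList.length (s*s)) s
    have h2 : full * s + rem = min msg.toList.length (s*s) := hm
    have h3 : s * (min msg.toList.length (s*s) / s) = (min msg.toList.length (s*s) / s) * s :=
      Nat.mul_comm _ _
    have h4 : min msg.toList.length (s*s) % s < s := Nat.mod_lt _ hs0
    generalize hA : (min msg.toList.length (s*s)) / s = q at *
    -- uniqueness of quotient
    rcases Nat.lt_trichotomy q full with h | h | h
    · exfalso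
      have h5 : (q+1) * s ≤ full * s := Nat.mul_le_mul_right s (by omega)
      rw [Nat.succ_mul] at h5
      generalize q * s = A at *
      generalize full * s = B at *
      omega
    · exact h
    · exfalso
      have h5 : (full+1) * s ≤ q * s := Nat.mul_le_mul_right s (by omega)
      rw [Nat.succ_mul] at h5
      generalize q * s = A at *
      generalize full * s = B at *
      omega
  have hremq : (min msg.toList.length (s*s)) % s = rem := by
    have := Nat.div_add_mod (min msg.toList.length (s*s)) s
    rw [hfull] at this
    have h3 : s * full = full * s := Nat.mul_comm _ _
    generalize full * s = B at *
    omega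
  rw [hfull, hremq]
  rw [PySem.List.foldl_append_singleton_eq_map, List.nil_append]
  rw [PySem.List.pyRange_zero_natCast, List.map_map]
  unfold pvSpecF
  apply List.map_congr_left
  intro i hi0
  have hi : i < s := List.mem_range.mp hi0
  simp only [Function.comp]
  have hcnt : ((full:Int) + (if (i:Int) < (rem:Int) then (1:Int) else 0))
      = ((pvCnt full rem i : Nat):Int) := by
    unfold pvCnt
    rcases Nat.lt_or_ge i rem with h | h
    · rw [if_pos (by exact_mod_cast h), if_pos h]; push_cast; ring
    · rw [if_neg (by exact_mod_cast Nat.not_lt.mpr h), if_neg (Nat.not_lt.mpr h)]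
      push_cast; ring
  have hoff : ((i:Int) * (full:Int) + min (i:Int) (rem:Int))
      = ((pvOff full rem i : Nat):Int) := by
    unfold pvOff
    push_cast [Nat.cast_min]
    ring
  rw [hcnt, hoff]
  rw [PySem.List.slice_natCast_add]
  rw [PySem.List.pyRepeat_singleton, pv_toNat_sub]
  rw [show (fun c => pvSingB c) = pvSing from rfl]
  exact pv_rowB msg.toList s full rem hs0 hsn hm hrem i hi

-- ── verdict assembly ──
theorem pv_empty_case (msg : String) (size : Int) (hsz : size ≤ 0) :
    d_string_table msg size = [] ∧ d_string_table_alt msg size = [] := by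
  constructor
  · unfold d_string_table
    rw [PySem.List.pyRange_one_eq_nil hsz,
        PySem.List.pyRange_neg_one_eq_nil (by omega)]
    simp
  · unfold d_string_table_alt
    rw [if_pos hsz]

theorem d_string_table_spec : Claim_equal_d_string_table := by
  unfold Claim_equal_d_string_table
  intro msg size hdom hpre
  unfold Spec_d_string_table
  by_cases hsz : size ≤ 0
  · obtain ⟨h1, h2⟩ := pv_empty_case msg size hsz
    rw [h1, h2]
  · push_neg at hsz
    have hs' : size = ((size.toNat : Nat) : Int) := (Int.toNat_of_nonneg (by omega)).symm
    rw [hs']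
    have hs0 : 0 < size.toNat := by omega
    have hsn : size.toNat ≤ msg.toList.length := by
      unfold Pre_d_string_table at hpre
      omega
    have hm : (min msg.toList.length (size.toNat*size.toNat)) / size.toNat * size.toNat
        + (min msg.toList.length (size.toNat*size.toNat)) % size.toNat
        = min msg.toList.length (size.toNat*size.toNat) := by
      rw [Nat.mul_comm]
      exact Nat.div_add_mod _ _
    rw [pv_portA msg size.toNat _ _ hs0 hsn hm (Nat.mod_lt _ hs0),
        pv_portB msg size.toNat _ _ hs0 hsn hm (Nat.mod_lt _ hs0)]
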